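-- pv_equiv track=rewrite | github.com/pypi-data/pypi-mirror-400 | packages/microhttpx/microhttpx-0.3.1-py3-none-any.whl/microhttpx/parser.py | path_params
-- ===== SOURCE A (Python) =====
-- def path_params(route_pattern:str, path:str):
--     path = path.split("?", 1)[0]
--
--     r_parts = route_pattern.strip("/").split("/")
--     p_parts = path.strip("/").split("/")
--
--     if r_parts == [''] and p_parts == ['']:
--         return {}
--
--     if len(r_parts) != len(p_parts):
--         return None
--
--     params = {}
--     for r, p in zip(r_parts, p_parts):
--         if r.startswith("{") and r.endswith("}"):
--             params[r[1:-1]] = p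
--         elif r != p:
--             return None
--
--     return params
-- ===== SOURCE B (Python) =====
-- def path_params(route_pattern: str, path: str):
--     # Compile the route once into (is_var, value) tokens, then consume the raw
--     # path string with partition('/') -- no splitting of the path, no length
--     # check, no zip.
--     path = path.split("?", 1)[0].strip("/")
--
--     tokens = []
--     for seg in route_pattern.strip("/").split("/"):
--         if seg.startswith("{") and seg.endswith("}"):
--             tokens.append((True, seg[1:-1]))
--         else:
--             tokens.append((False, seg))
--
--     params = {}
--     s = path
--     while tokens:
--         (is_var, val), tokens = tokens[0], tokens[1:]
--         if tokens:
--             seg, sep, rest = s.partition("/")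
--             if not sep:
--                 return None
--         else:
--             if "/" in s:
--                 return None
--             seg, rest = s, ""
--         if is_var:
--             params[val] = seg
--         elif seg != val:
--             return None
--         s = rest
--     return params
-- ===== Notes on version B (the rewrite author's own statement) =====
-- stated objective: alternative
-- what changed: A splits the path into segments, compares lengths and walks the zipped segment pairs; B instead compiles the route once into (is_var, value) tokens and then consumes the raw path string recursively with partition('/'), never splitting the path, with no length check or zip.
import Mathlib
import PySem

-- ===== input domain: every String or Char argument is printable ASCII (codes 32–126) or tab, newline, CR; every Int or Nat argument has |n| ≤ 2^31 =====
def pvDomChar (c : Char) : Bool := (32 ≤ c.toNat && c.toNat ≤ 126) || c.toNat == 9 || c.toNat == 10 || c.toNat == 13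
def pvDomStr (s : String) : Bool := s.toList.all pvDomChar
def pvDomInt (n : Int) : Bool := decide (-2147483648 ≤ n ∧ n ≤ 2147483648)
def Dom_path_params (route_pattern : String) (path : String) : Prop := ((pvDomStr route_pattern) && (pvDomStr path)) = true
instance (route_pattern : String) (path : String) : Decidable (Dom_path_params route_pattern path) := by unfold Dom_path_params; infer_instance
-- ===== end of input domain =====

-- B compiles the route into tokens once and then consumes the raw path string recursively
-- with partition('/') — no splitting of the path, no length check, no zip (objective: alternative).

-- ===== PORT A =====
-- the 'for r, p in zip(...)' loop with its early 'return None', as structural recursion over the zipped list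
def pathParamsLoopA : List (String × String) → PySem.Dict String String → Option (PySem.Dict String String)
  | [], params => some params
  | (r, p) :: rest, params =>
    if PySem.Str.startswith r "{" && PySem.Str.endswith r "}" then
      pathParamsLoopA rest (params.insert (PySem.Str.slice r (some 1) (some (-1))) p)
    else if r ≠ p then none
    else pathParamsLoopA rest params

def path_params (route_pattern : String) (path : String) : Option (List (String × String)) :=
  let path := ((PySem.Str.splitMax? path "?" 1).getD []).headD ""   -- path.split("?", 1)[0]; split with a nonempty sep is always some nonempty
  let r_parts := (PySem.Str.split? (PySem.Str.stripChars route_pattern "/") "/").getD []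
  let p_parts := (PySem.Str.split? (PySem.Str.stripChars path "/") "/").getD []
  if r_parts = [""] ∧ p_parts = [""] then some []
  else if r_parts.length ≠ p_parts.length then none
  else (pathParamsLoopA (r_parts.zip p_parts) PySem.Dict.empty).map PySem.Dict.items

-- ===== PORT B =====
-- one compiled token per route segment: (is_var, name-or-literal)
def pvClassify (seg : String) : Bool × String :=
  if PySem.Str.startswith seg "{" && PySem.Str.endswith seg "}" then
    (true, PySem.Str.slice seg (some 1) (some (-1)))
  else (false, seg)

def pvNotSep (c : Char) : Bool := c ≠ '/'

-- _match of Source B; s.partition("/") on the single-char separator "/" is exactly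
-- (s.takeWhile pvNotSep, sep-found?, (s.dropWhile pvNotSep).tail) — hand-ported, step for step.
def pvMatch : List (Bool × String) → List Char → PySem.Dict String String → Option (PySem.Dict String String)
  | [], _, params => some params
  | (is_var, val) :: rest_tokens, s, params =>
    let segrest : Option (List Char × List Char) :=
      match rest_tokens with
      | _ :: _ =>
        if PySem.Chars.isIn ['/'] s then                               -- partition: 'if not sep: return None'
          some (s.takeWhile pvNotSep, (s.dropWhile pvNotSep).tail)
        else none
      | [] => if PySem.Chars.isIn ['/'] s then none else some (s, []) -- "'/' in s: return None"
    match segrest with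
    | none => none
    | some (seg, rest) =>
      if is_var then pvMatch rest_tokens rest (params.insert val (String.ofList seg))
      else if String.ofList seg ≠ val then none
      else pvMatch rest_tokens rest params

def path_params_alt (route_pattern : String) (path : String) : Option (List (String × String)) :=
  let path := ((PySem.Str.splitMax? path "?" 1).getD []).headD ""
  let s := (PySem.Str.stripChars path "/").toList
  let tokens := ((PySem.Str.split? (PySem.Str.stripChars route_pattern "/") "/").getD []).map pvClassify
  (pvMatch tokens s PySem.Dict.empty).map PySem.Dict.items

-- ===== PRECONDITION & SPEC =====
def Spec_path_params (route_pattern : String) (path : String) (out : Option (List (String × String))) : Prop := out = path_params_alt route_pattern path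
instance (route_pattern : String) (path : String) (out : Option (List (String × String))) : Decidable (Spec_path_params route_pattern path out) := by unfold Spec_path_params; infer_instance

-- ===== CLAIM (what is proved, stated in full; the proofs are below) =====
def Claim_equal_path_params : Prop := ∀ (route_pattern : String) (path : String), Dom_path_params route_pattern path → Spec_path_params route_pattern path (path_params route_pattern path)

-- ===== LEMMAS AND PROOFS =====

def pvSegs (s : List Char) : List (List Char) :=
  if h : '/' ∈ s then
    s.takeWhile pvNotSep :: pvSegs ((s.dropWhile pvNotSep).tail)
  else [s]
termination_by s.length
decreasing_by
  have h1 : (s.dropWhile pvNotSep).length ≤ s.length := List.length_dropWhile_le ..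
  have h2 : s.dropWhile pvNotSep ≠ [] := by
    intro hnil
    have := List.dropWhile_eq_nil_iff.mp hnil _ h
    simp [pvNotSep] at this
  cases hd : s.dropWhile pvNotSep with
  | nil => exact absurd hd h2
  | cons a t => rw [hd] at h1; simp at h1 ⊢; omega

theorem pvSegs_no_sep (s : List Char) (h : '/' ∉ s) : pvSegs s = [s] := by
  rw [pvSegs, dif_neg h]

theorem pvSegs_sep (s : List Char) (h : '/' ∈ s) :
    pvSegs s = s.takeWhile pvNotSep :: pvSegs ((s.dropWhile pvNotSep).tail) := by
  rw [pvSegs, dif_pos h]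

theorem pvSegs_len_pos (s : List Char) : (pvSegs s).length ≠ 0 := by
  unfold pvSegs; split <;> simp

theorem pvSegs_split_sep (a b : List Char) (ha : ∀ x ∈ a, x ≠ '/') :
    pvSegs (a ++ '/'::b) = a :: pvSegs b := by
  rw [pvSegs, dif_pos (by simp)]
  rw [List.takeWhile_append, List.dropWhile_append]
  have h1 : List.takeWhile pvNotSep a = a := by
    rw [List.takeWhile_eq_self_iff]; intro x hx; simp [pvNotSep, ha x hx]
  have h2 : List.dropWhile pvNotSep a = [] := by
    rw [List.dropWhile_eq_nil_iff]; intro x hx; simp [pvNotSep, ha x hx]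
  simp [h1, h2, pvNotSep]

theorem go_eq (fuel : Nat) : ∀ (l cur : List Char) (acc : List (List Char)),
    l.length < fuel → (∀ c ∈ cur, c ≠ '/') →
    PySem.Chars.splitOn.go ['/'] fuel l cur acc = acc.reverse ++ pvSegs (cur.reverse ++ l) := by
  induction fuel with
  | zero => intro l cur acc h _; omega
  | succ n ih =>
    intro l cur acc hl hcur
    have hcr : ∀ x ∈ cur.reverse, x ≠ '/' := by simpa using fun x h => hcur x h
    cases l with
    | nil =>
      rw [PySem.Chars.splitOn.go.eq_def]
      rw [List.append_nil, pvSegs_no_sep _ (by intro h; exact hcr _ h rfl)]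
      simp
    | cons c rest =>
      rw [PySem.Chars.splitOn.go.eq_def]
      by_cases hc : c = '/'
      · subst hc
        have hpre : List.isPrefixOf ['/'] ('/'::rest) = true := by simp [List.isPrefixOf]
        simp only [hpre, if_true]
        show PySem.Chars.splitOn.go ['/'] n rest [] (cur.reverse :: acc) = _
        rw [ih _ _ _ (by simpa using hl) (by simp)]
        rw [pvSegs_split_sep _ _ hcr]
        simp
      · have hpre : List.isPrefixOf ['/'] (c::rest) = false := by
          simp [List.isPrefixOf]; exact fun h => absurd h.symm hc
        simp only [hpre]
        show PySem.Chars.splitOn.go ['/'] n rest (c :: cur) acc = _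
        rw [ih _ _ _ (by simpa using hl)
          (by intro x hx; rcases List.mem_cons.mp hx with rfl|h; exacts [hc, hcur _ h])]
        simp

theorem splitOn_eq_pvSegs (s : List Char) : PySem.Chars.splitOn s ['/'] = pvSegs s := by
  unfold PySem.Chars.splitOn
  rw [go_eq (s.length+1) s [] [] (by omega) (by simp)]
  simp

theorem isIn_slash (s : List Char) : PySem.Chars.isIn ['/'] s = true ↔ '/' ∈ s := by
  rw [PySem.Chars.isIn_iff_infix]; exact List.singleton_infix_iff '/' s

theorem isIn_slash_true (s : List Char) (h : '/' ∈ s) : PySem.Chars.isIn ['/'] s = true :=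
  (isIn_slash s).mpr h

theorem isIn_slash_false (s : List Char) (h : '/' ∉ s) : PySem.Chars.isIn ['/'] s = false := by
  rw [Bool.eq_false_iff]; intro hh; exact h ((isIn_slash s).mp hh)

theorem pvClassify_pos (r : String) (h : (PySem.Str.startswith r "{" && PySem.Str.endswith r "}") = true) :
    pvClassify r = (true, PySem.Str.slice r (some 1) (some (-1))) := by
  unfold pvClassify; rw [if_pos h]

theorem pvClassify_neg (r : String) (h : (PySem.Str.startswith r "{" && PySem.Str.endswith r "}") = false) :
    pvClassify r = (false, r) := by
  unfold pvClassify; rw [if_neg (by rw [Bool.not_eq_true]; exact h)]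

theorem pvMatch_last (is_var : Bool) (val : String) (s : List Char) (params : PySem.Dict String String) :
    pvMatch [(is_var, val)] s params =
      if PySem.Chars.isIn ['/'] s then none
      else if is_var then some (params.insert val (String.ofList s))
      else if String.ofList s ≠ val then none else some params := by
  by_cases h : PySem.Chars.isIn ['/'] s = true
  · simp only [pvMatch, h, if_true]
  · rw [Bool.not_eq_true] at h
    simp only [pvMatch, h, Bool.false_eq_true, if_false]

theorem pvMatch_cons (is_var : Bool) (val : String) (t2 : Bool × String) (rest2 : List (Bool × String))
    (s : List Char) (params : PySem.Dict String String) :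
    pvMatch ((is_var, val) :: t2 :: rest2) s params =
      if PySem.Chars.isIn ['/'] s then
        (if is_var then
          pvMatch (t2 :: rest2) ((s.dropWhile pvNotSep).tail)
            (params.insert val (String.ofList (s.takeWhile pvNotSep)))
        else if String.ofList (s.takeWhile pvNotSep) ≠ val then none
        else pvMatch (t2 :: rest2) ((s.dropWhile pvNotSep).tail) params)
      else none := by
  by_cases h : PySem.Chars.isIn ['/'] s = true
  · simp only [pvMatch, h, if_true]
  · rw [Bool.not_eq_true] at h
    simp only [pvMatch, h, Bool.false_eq_true, if_false]


theorem loopA_pos (r p : String) (rest : List (String × String)) (d : PySem.Dict String String)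
    (h : (PySem.Str.startswith r "{" && PySem.Str.endswith r "}") = true) :
    pathParamsLoopA ((r, p) :: rest) d =
      pathParamsLoopA rest (d.insert (PySem.Str.slice r (some 1) (some (-1))) p) := by
  simp only [pathParamsLoopA]; rw [if_pos h]

theorem loopA_neg_eq (r p : String) (rest : List (String × String)) (d : PySem.Dict String String)
    (h : (PySem.Str.startswith r "{" && PySem.Str.endswith r "}") = false) (he : r = p) :
    pathParamsLoopA ((r, p) :: rest) d = pathParamsLoopA rest d := by
  simp only [pathParamsLoopA]
  rw [if_neg (by rw [Bool.not_eq_true]; exact h), if_neg (by simp [he])]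

theorem loopA_neg_ne (r p : String) (rest : List (String × String)) (d : PySem.Dict String String)
    (h : (PySem.Str.startswith r "{" && PySem.Str.endswith r "}") = false) (he : r ≠ p) :
    pathParamsLoopA ((r, p) :: rest) d = none := by
  simp only [pathParamsLoopA]
  rw [if_neg (by rw [Bool.not_eq_true]; exact h), if_pos he]

theorem match_eq_loop (R' : List String) : ∀ (r : String) (s : List Char) (d : PySem.Dict String String),
    pvMatch ((r :: R').map pvClassify) s d =
      if (r :: R').length = (pvSegs s).length
      then pathParamsLoopA ((r :: R').zip ((pvSegs s).map String.ofList)) d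
      else none := by
  induction R' with
  | nil =>
    intro r s d
    by_cases hs : '/' ∈ s
    · have hne : ¬ (([r] : List String).length = (pvSegs s).length) := by
        rw [pvSegs_sep s hs]
        intro hcon
        exact pvSegs_len_pos _ (by simpa using hcon.symm)
      rw [if_neg hne]
      by_cases hcl : (PySem.Str.startswith r "{" && PySem.Str.endswith r "}") = true
      · rw [List.map_cons, List.map_nil, pvClassify_pos r hcl, pvMatch_last,
          isIn_slash_true s hs, if_pos rfl]
      · rw [Bool.not_eq_true] at hcl
        rw [List.map_cons, List.map_nil, pvClassify_neg r hcl, pvMatch_last,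
          isIn_slash_true s hs, if_pos rfl]
    · rw [pvSegs_no_sep s hs, if_pos (by simp)]
      rw [show List.map String.ofList [s] = [String.ofList s] from rfl,
        List.map_cons, List.map_nil, List.zip_cons_cons, List.zip_nil_right]
      by_cases hcl : (PySem.Str.startswith r "{" && PySem.Str.endswith r "}") = true
      · rw [pvClassify_pos r hcl, pvMatch_last, isIn_slash_false s hs,
          loopA_pos r _ _ d hcl]
        simp [pathParamsLoopA]
      · rw [Bool.not_eq_true] at hcl
        rw [pvClassify_neg r hcl, pvMatch_last, isIn_slash_false s hs]
        by_cases he : String.ofList s = r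
        · rw [loopA_neg_eq r _ _ d hcl he.symm]
          simp [pathParamsLoopA, he]
        · rw [loopA_neg_ne r _ _ d hcl (fun hh => he hh.symm)]
          simp [he]
  | cons r2 R'' ih =>
    intro r s d
    by_cases hs : '/' ∈ s
    · rw [pvSegs_sep s hs]
      have hlen : ((r :: r2 :: R'').length = (s.takeWhile pvNotSep :: pvSegs ((s.dropWhile pvNotSep).tail)).length) ↔
          ((r2 :: R'').length = (pvSegs ((s.dropWhile pvNotSep).tail)).length) := by simp
      have ih1 := ih r2 ((s.dropWhile pvNotSep).tail)
      simp only [List.map_cons] at ih1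
      by_cases hcl : (PySem.Str.startswith r "{" && PySem.Str.endswith r "}") = true
      · rw [List.map_cons, List.map_cons, pvClassify_pos r hcl, pvMatch_cons,
          isIn_slash_true s hs, if_pos rfl, if_pos rfl, ih1]
        by_cases hl : (r2 :: R'').length = (pvSegs ((s.dropWhile pvNotSep).tail)).length
        · rw [if_pos hl, if_pos (hlen.mpr hl), List.map_cons, List.zip_cons_cons,
            loopA_pos r _ _ d hcl]
        · rw [if_neg hl, if_neg (fun h => hl (hlen.mp h))]
      · rw [Bool.not_eq_true] at hcl
        rw [List.map_cons, List.map_cons, pvClassify_neg r hcl, pvMatch_cons,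
          isIn_slash_true s hs, if_pos rfl, if_neg (by simp)]
        by_cases he : String.ofList (s.takeWhile pvNotSep) = r
        · rw [if_neg (by simp [he]), ih1]
          by_cases hl : (r2 :: R'').length = (pvSegs ((s.dropWhile pvNotSep).tail)).length
          · rw [if_pos hl, if_pos (hlen.mpr hl), List.map_cons, List.zip_cons_cons,
              loopA_neg_eq r _ _ d hcl he.symm]
          · rw [if_neg hl, if_neg (fun h => hl (hlen.mp h))]
        · rw [if_pos he]
          by_cases hl : (r :: r2 :: R'').length = (s.takeWhile pvNotSep :: pvSegs ((s.dropWhile pvNotSep).tail)).length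
          · rw [if_pos hl, List.map_cons, List.zip_cons_cons,
              loopA_neg_ne r _ _ d hcl (fun hh => he hh.symm)]
          · rw [if_neg hl]
    · rw [pvSegs_no_sep s hs, if_neg (by simp), List.map_cons, List.map_cons]
      rcases e : pvClassify r with ⟨v, w⟩
      rw [pvMatch_cons, isIn_slash_false s hs]
      simp

theorem pvSegs_ne_nil (s : List Char) : pvSegs s ≠ [] := by
  unfold pvSegs; split <;> simp

-- Python's str.split("/") (PySem's splitOn) computes exactly pvSegs
theorem split_getD_eq (t : String) :
    (PySem.Str.split? t "/").getD [] = (pvSegs t.toList).map String.ofList := by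
  rw [PySem.Str.split?]
  rw [show ("/" : String).toList = ['/'] from rfl]
  rw [PySem.Chars.split?]
  rw [if_neg (by simp)]
  rw [splitOn_eq_pvSegs]
  rfl

-- ===== VERDICT (by name: the statement is the Claim_ definition above) =====
theorem match_eq_loop' (R : List String) (hR : R ≠ []) (s : List Char) (d : PySem.Dict String String) :
    pvMatch (R.map pvClassify) s d =
      if R.length = (pvSegs s).length
      then pathParamsLoopA (R.zip ((pvSegs s).map String.ofList)) d
      else none := by
  cases R with
  | nil => exact absurd rfl hR
  | cons r R' => exact match_eq_loop R' r s d

theorem pvFinal (X Y : List (List Char)) :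
    (if X.map String.ofList = [""] ∧ Y.map String.ofList = [""] then some []
     else if (X.map String.ofList).length ≠ (Y.map String.ofList).length then none
     else Option.map PySem.Dict.items
       (pathParamsLoopA ((X.map String.ofList).zip (Y.map String.ofList)) PySem.Dict.empty)) =
    Option.map PySem.Dict.items
      (if (X.map String.ofList).length = Y.length
       then pathParamsLoopA ((X.map String.ofList).zip (Y.map String.ofList)) PySem.Dict.empty
       else none) := by
  by_cases hb : X.map String.ofList = [""] ∧ Y.map String.ofList = [""]
  · rw [if_pos hb]
    obtain ⟨h1, h2⟩ := hb
    have hYlen : Y.length = 1 := by have := congrArg List.length h2; simpa using this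
    rw [if_pos (by rw [h1, hYlen]; rfl), h1, h2]
    rfl
  · rw [if_neg hb]
    by_cases hl : (X.map String.ofList).length = Y.length
    · rw [if_pos hl, if_neg (fun hcon => hcon (by simpa [List.length_map] using hl))]
    · rw [if_neg hl, if_pos (by simpa [List.length_map] using hl)]
      rfl

theorem path_params_spec : Claim_equal_path_params := by
  intro route_pattern path _
  unfold Spec_path_params path_params path_params_alt
  dsimp only
  rw [split_getD_eq, split_getD_eq]
  rw [match_eq_loop' _ (by
    intro hnil
    exact pvSegs_ne_nil _ (List.map_eq_nil_iff.mp hnil))]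
  exact pvFinal _ _
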